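-- pv_equiv track=rewrite | github.com/DexterHK/codons-Visualizer | backend/utils/properties_utils.py | is_comma_free
-- ===== SOURCE A (Python) =====
-- def shift_sequence_transform(tuples, shift_amount):
--     """
--     Implements the ShiftSequence transformation from GCAT.
--     Joins tuples, shifts the string, then splits back into tuples.
--     """
--     # Join tuples with spaces (like Tuple.joinTuples)
--     joined = ' '.join(tuples)
--
--     # Apply shift transformation (shift_amount times)
--     for _ in range(shift_amount):
--         # Pattern A: (\\s)(\\S) -> $2$1 (swap space with next non-space)
--         # Pattern B: ^(\\S)(.*)$ -> $2$1 (move first char to end)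
--
--         # First, swap spaces with following non-space characters
--         result = ""
--         i = 0
--         while i < len(joined):
--             if i < len(joined) - 1 and joined[i] == ' ' and joined[i + 1] != ' ':
--                 # Swap space with next character
--                 result += joined[i + 1] + joined[i]
--                 i += 2
--             else:
--                 result += joined[i]
--                 i += 1
--
--         # Then move first character to end if it's not a space
--         if result and result[0] != ' ':
--             result = result[1:] + result[0]
--
--         joined = result
--
--     # Split back into tuples (like Tuple.splitTuples)
--     return joined.split()
--
-- def has_duplicates(strings):
--     """Check if the list of strings contains duplicates."""
--     return len(strings) != len(set(strings))
--
-- def collections_disjoint(set1, set2):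
--     """Check if two collections have no elements in common (like Collections.disjoint)."""
--     return len(set(set1) & set(set2)) == 0
--
-- def is_comma_free(strings, length=None):
--     """
--     Checks if a sequence of strings is comma-free according to the GCAT implementation.
--
--     This is a direct translation of the Java CommaFree.test() method.
--
--     Parameters:
--     - strings: List of strings to check.
--     - length: The length of each string (optional, will be inferred if not provided).
--
--     Returns:
--     - True if the sequence is comma-free, False otherwise.
--     """
--     if not strings:
--         return True  # Empty set is comma-free
--
--     # Infer length if not provided
--     if length is None:
--         length = len(strings[0]) if strings else 0
--
--     # Check if all strings have the same length
--     if len(set(len(s) for s in strings)) != 1: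
--         return False
--
--     # Check for duplicates first
--     if has_duplicates(strings):
--         return False
--
--     # Direct translation of the Java algorithm:
--     # for(Tuple tupleA:tuples) for(Tuple tupleB:tuples)
--     #   if(tupleA!=tupleB) for(shift=1,shifted=Arrays.asList(tupleA,tupleB);shift<length;shift++)
--     #     if(!Collections.disjoint(tuples,shifted = SHIFT.transform(shifted))) {
--
--     for tupleA in strings:
--         for tupleB in strings:
--             if tupleA != tupleB:
--                 # Create initial shifted collection: Arrays.asList(tupleA, tupleB)
--                 shifted = [tupleA, tupleB]
--
--                 # For each shift from 1 to length-1
--                 for shift in range(1, length):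
--                     # Apply SHIFT.transform(shifted)
--                     shifted = shift_sequence_transform(shifted, 1)
--
--                     # Check if Collections.disjoint(tuples, shifted) is false
--                     if not collections_disjoint(strings, shifted):
--                         return False
--
--     return True  # No collision found
-- ===== SOURCE B (Python) =====
-- def is_comma_free(strings, length=None):
--     """Comma-free check by direct window slicing instead of the GCAT
--     join/shift/split string machinery."""
--     if not strings:
--         return True
--     if length is None:
--         length = len(strings[0])
--     if len(set(len(s) for s in strings)) != 1:
--         return False
--     words = set(strings)
--     if len(words) != len(strings):
--         return False
--     if len(words) < 2:
--         return True
--     L = len(strings[0])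
--     if length > L:
--         # some shift reaches a full rotation, whose windows are codons themselves
--         return False
--     return all(a[k:] + b[:k] not in words
--                for a in words for b in words if a != b
--                for k in range(1, length))
-- ===== Notes on version B (the rewrite author's own statement) =====
-- stated objective: simpler
-- what changed: B drops shift_sequence_transform's join-with-spaces/regex-style swap/split machinery and the stateful 'shifted' accumulator entirely: it tests each cyclic window a[k:]+b[:k] of a pair concatenation directly against set(strings), returning False outright when length exceeds the codon length (a full rotation always collides).
-- outside the precondition, e.g. on is_comma_free(['a b', 'bab'], None): A returns False, B returns True; on is_comma_free(['a ', '  '], None): A returns True, B returns False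
import Mathlib
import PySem

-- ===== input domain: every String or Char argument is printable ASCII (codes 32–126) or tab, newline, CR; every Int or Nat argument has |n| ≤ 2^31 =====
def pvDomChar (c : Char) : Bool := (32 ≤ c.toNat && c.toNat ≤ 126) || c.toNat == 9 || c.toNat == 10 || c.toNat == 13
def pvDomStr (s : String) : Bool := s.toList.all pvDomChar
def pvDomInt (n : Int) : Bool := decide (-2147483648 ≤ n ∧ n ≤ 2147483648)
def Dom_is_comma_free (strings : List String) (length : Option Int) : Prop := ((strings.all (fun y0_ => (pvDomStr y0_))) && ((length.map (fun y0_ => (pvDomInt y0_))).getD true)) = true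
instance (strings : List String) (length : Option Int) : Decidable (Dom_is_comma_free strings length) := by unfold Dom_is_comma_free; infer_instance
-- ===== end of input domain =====

-- B replaces the GCAT join/shift/split string machinery by direct window slicing
-- (objective: simpler); proved equal to A on whitespace-free codon strings.

-- ===== PORT A =====
-- inner while-loop of shift_sequence_transform: swap each ' ' with the following non-space
def pvSwap : List Char → List Char
  | [] => []
  | [c] => [c]
  | c1 :: c2 :: rest =>
    if c1 = ' ' ∧ c2 ≠ ' ' then c2 :: ' ' :: pvSwap rest
    else c1 :: pvSwap (c2 :: rest)
termination_by cs => cs.length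

-- "move first character to end if it's not a space"
def pvMoveFirst : List Char → List Char
  | [] => []
  | c :: rest => if c ≠ ' ' then rest ++ [c] else c :: rest

def shift_sequence_transform (tuples : List String) (shift_amount : Int) : List String :=
  let joined := PySem.Str.join " " tuples
  let final := (PySem.List.pyRange 0 shift_amount 1).foldl
      (fun j _ => String.ofList (pvMoveFirst (pvSwap j.toList))) joined
  PySem.Str.split₀ final

def has_duplicates (strings : List String) : Bool :=
  decide (strings.length ≠ (PySem.Set.ofList strings).length)

def collections_disjoint (set1 set2 : List String) : Bool :=
  decide ((PySem.Set.inter (PySem.Set.ofList set1) (PySem.Set.ofList set2)).length = 0)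

-- the innermost 'for shift in range(1, length)' loop with its early 'return False'
def pvShiftLoop (strings : List String) : List Int → List String → Bool
  | [], _ => false
  | _ :: rest, shifted =>
    let shifted' := shift_sequence_transform shifted 1
    if collections_disjoint strings shifted' = false then true
    else pvShiftLoop strings rest shifted'

def is_comma_free (strings : List String) (length : Option Int) : Bool :=
  match strings with
  | [] => true
  | s0 :: _ =>
    let len := match length with | none => PySem.Str.len s0 | some v => v
    if (PySem.Set.ofList (strings.map (fun s => PySem.Str.len s))).length ≠ 1 then false
    else if has_duplicates strings then false
    else if strings.any (fun a => strings.any (fun b =>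
          if a ≠ b then pvShiftLoop strings (PySem.List.pyRange 1 len 1) [a, b] else false))
      then false
    else true

-- ===== PORT B =====
-- the window a[k:] + b[:k]
def pvWindow (a b : String) (k : Int) : String :=
  String.ofList (PySem.List.slice a.toList (some k) none ++ PySem.List.slice b.toList none (some k))

def is_comma_free_alt (strings : List String) (length : Option Int) : Bool :=
  match strings with
  | [] => true
  | s0 :: _ =>
    let len := match length with | none => PySem.Str.len s0 | some v => v
    if (PySem.Set.ofList (strings.map (fun s => PySem.Str.len s))).length ≠ 1 then false
    else
      let words := PySem.Set.ofList strings
      if words.length ≠ strings.length then false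
      else if words.length < 2 then true
      else if len > PySem.Str.len s0 then false
      else words.all (fun a => words.all (fun b =>
        if a ≠ b then
          (PySem.List.pyRange 1 len 1).all (fun k => !(PySem.Set.contains words (pvWindow a b k)))
        else true))

-- ===== PRECONDITION & SPEC =====
-- Pre_ admits every list of whitespace-free strings, and in addition every input whose result
-- is already decided by the shape checks (at most one string, duplicates, unequal lengths, or an
-- empty shift range), where the space-join machinery is never consulted; it excludes only inputs
-- with a whitespace-containing codon actually reaching the shift loop, where A's value is an
-- artefact of the space-join encoding which no implementation would specify.
def Pre_is_comma_free (strings : List String) (length : Option Int) : Prop :=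
  (strings.all fun s => s.toList.all fun c => !PySem.Chars.isspace c) = true
  ∨ strings.length ≤ 1
  ∨ ¬ strings.Nodup
  ∨ (strings.any fun s => strings.any fun t => decide (s.toList.length ≠ t.toList.length)) = true
  ∨ length.getD (PySem.Str.len strings.headI) ≤ 1
instance (strings : List String) (length : Option Int) : Decidable (Pre_is_comma_free strings length) := by unfold Pre_is_comma_free; infer_instance

def pvWitness_is_comma_free : List String × Option Int := (["ab", "ba"], none)

def Spec_is_comma_free (strings : List String) (length : Option Int) (out : Bool) : Prop := out = is_comma_free_alt strings length
instance (strings : List String) (length : Option Int) (out : Bool) : Decidable (Spec_is_comma_free strings length out) := by unfold Spec_is_comma_free; infer_instance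

-- ===== CLAIM (what is proved, stated in full; the proofs are below) =====
def Claim_equal_is_comma_free : Prop := ∀ (strings : List String) (length : Option Int), Dom_is_comma_free strings length → Pre_is_comma_free strings length → Spec_is_comma_free strings length (is_comma_free strings length)

-- ===== LEMMAS AND PROOFS =====

lemma pvPre_forall (strings : List String)
    (h : (strings.all fun s => s.toList.all fun c => !PySem.Chars.isspace c) = true) :
    ∀ s ∈ strings, ∀ c ∈ s.toList, PySem.Chars.isspace c = false := by
  rw [List.all_eq_true] at h
  intro s hs c hc
  simpa using (List.all_eq_true).1 (h s hs) c hc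

lemma pvIfFalse {α : Sort _} (b : Bool) (hb : b = false) (x y : α) :
    (if b = true then x else y) = y := by simp [hb]

lemma pvIfTrue {α : Sort _} (b : Bool) (hb : b = true) (x y : α) :
    (if b = true then x else y) = x := by simp [hb]

-- "no whitespace character" invariant carried through the proofs
def pvNS (l : List Char) : Prop := ∀ c ∈ l, PySem.Chars.isspace c = false

-- one GCAT shift step on the pair of char lists
def pvStepP (p : List Char × List Char) : List Char × List Char :=
  (p.1.tail ++ p.2.take 1, p.2.tail ++ p.1.take 1)

lemma pvNS_no_space {l : List Char} (h : pvNS l) : ∀ c ∈ l, c ≠ ' ' := by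
  intro c hc he
  have := h c hc
  subst he
  simp [PySem.Chars.isspace] at this

lemma pvSwap_cons_ne (c : Char) (l : List Char) (hc : c ≠ ' ') (hl : l ≠ []) :
    pvSwap (c :: l) = c :: pvSwap l := by
  cases l with
  | nil => exact absurd rfl hl
  | cons c2 rest => rw [pvSwap, if_neg (by simp [hc])]

lemma pvSwap_no_space : ∀ (l : List Char), (∀ c ∈ l, c ≠ ' ') → pvSwap l = l := by
  intro l
  induction l using pvSwap.induct with
  | case1 => intro _; rw [pvSwap]
  | case2 c => intro _; rw [pvSwap]
  | case3 c1 c2 rest hif ih => intro h; exact absurd hif.1 (h c1 (by simp))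
  | case4 c1 c2 rest hif ih =>
      intro h
      rw [pvSwap, if_neg hif, ih (fun c hc => h c (by simp at hc ⊢; tauto))]

lemma pvSwap_mid : ∀ (x : List Char) (y1 : Char) (yt : List Char),
    (∀ c ∈ x, c ≠ ' ') → y1 ≠ ' ' → (∀ c ∈ yt, c ≠ ' ') →
    pvSwap (x ++ ' ' :: y1 :: yt) = x ++ y1 :: ' ' :: yt := by
  intro x
  induction x with
  | nil =>
      intro y1 yt _ hy1 hyt
      rw [List.nil_append, pvSwap, if_pos ⟨rfl, hy1⟩, pvSwap_no_space yt hyt, List.nil_append]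
  | cons c xt ih =>
      intro y1 yt hx hy1 hyt
      rw [List.cons_append, pvSwap_cons_ne c _ (hx c (by simp)) (by simp),
        ih y1 yt (fun d hd => hx d (by simp [hd])) hy1 hyt, List.cons_append]

lemma pvGo_nonspace : ∀ (w : List Char) (cur : List Char) (acc : List (List Char)), pvNS w →
    PySem.Chars.split₀.go w cur acc =
      if (cur.reverse ++ w).isEmpty then acc.reverse else acc.reverse ++ [cur.reverse ++ w] := by
  intro w
  induction w with
  | nil =>
      intro cur acc _
      rw [PySem.Chars.split₀.go]
      by_cases h : cur.isEmpty
      · simp_all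
      · simp_all
  | cons c rest ih =>
      intro cur acc hw
      rw [PySem.Chars.split₀.go, if_neg (by simpa using hw c (by simp))]
      rw [ih (c :: cur) acc (fun d hd => hw d (by simp [hd]))]
      simp

lemma pvGo_prefix (v : List Char) : ∀ (u cur : List Char) (acc : List (List Char)), pvNS u →
    (cur ≠ [] ∨ u ≠ []) →
    PySem.Chars.split₀.go (u ++ ' ' :: v) cur acc =
      PySem.Chars.split₀.go v [] ((cur.reverse ++ u) :: acc) := by
  intro u
  induction u with
  | nil =>
      intro cur acc _ h
      have hcur : cur ≠ [] := by tauto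
      rw [List.nil_append, PySem.Chars.split₀.go, if_pos (by decide),
        if_neg (by simpa using hcur)]
      simp
  | cons c rest ih =>
      intro cur acc hu h
      rw [List.cons_append, PySem.Chars.split₀.go, if_neg (by simpa using hu c (by simp)),
        ih (c :: cur) acc (fun d hd => hu d (by simp [hd])) (Or.inl (by simp))]
      simp

lemma pvSplit₀_pair {u v : List Char} (hu : pvNS u) (hv : pvNS v)
    (hu0 : u ≠ []) (hv0 : v ≠ []) :
    PySem.Chars.split₀ (u ++ ' ' :: v) = [u, v] := by
  rw [PySem.Chars.split₀, pvGo_prefix v u [] [] hu (Or.inr hu0)]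
  rw [show ([] : List Char).reverse ++ u = u from by simp, pvGo_nonspace v [] [u] hv]
  simp [hv0]

lemma pvTransform_pair {x y : List Char} (hx : pvNS x) (hy : pvNS y)
    (hx0 : x ≠ []) (hy0 : y ≠ []) :
    shift_sequence_transform [String.ofList x, String.ofList y] 1 =
      [String.ofList (pvStepP (x, y)).1, String.ofList (pvStepP (x, y)).2] := by
  obtain ⟨x1, xt, rfl⟩ := List.exists_cons_of_ne_nil hx0
  obtain ⟨y1, yt, rfl⟩ := List.exists_cons_of_ne_nil hy0
  have hx1 : x1 ≠ ' ' := pvNS_no_space hx x1 (by simp)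
  have hy1 : y1 ≠ ' ' := pvNS_no_space hy y1 (by simp)
  have hxt : ∀ c ∈ xt, c ≠ ' ' := fun c hc => pvNS_no_space hx c (by simp [hc])
  have hyt : ∀ c ∈ yt, c ≠ ' ' := fun c hc => pvNS_no_space hy c (by simp [hc])
  rw [shift_sequence_transform]
  have hrange : PySem.List.pyRange 0 1 1 = [0] := by decide
  rw [hrange]
  simp only [List.foldl_cons, List.foldl_nil]
  have hjoin : (PySem.Str.join " " [String.ofList (x1 :: xt), String.ofList (y1 :: yt)]).toList
      = (x1 :: xt) ++ ' ' :: (y1 :: yt) := by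
    rw [PySem.Str.toList_join]
    simp [PySem.Chars.join, List.intercalate, String.toList_ofList]
  rw [hjoin]
  rw [show (x1 :: xt) ++ ' ' :: (y1 :: yt) = x1 :: (xt ++ ' ' :: y1 :: yt) from by simp]
  rw [show pvSwap (x1 :: (xt ++ ' ' :: y1 :: yt)) = x1 :: (xt ++ y1 :: ' ' :: yt) from ?_]
  · rw [pvMoveFirst, if_pos hx1]
    rw [show (xt ++ y1 :: ' ' :: yt) ++ [x1] = (xt ++ [y1]) ++ ' ' :: (yt ++ [x1]) from by simp]
    rw [PySem.Str.split₀, String.toList_ofList,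
      pvSplit₀_pair (fun c hc => ?_) (fun c hc => ?_) (by simp) (by simp)]
    · simp [pvStepP]
    · simp at hc
      rcases hc with h | h
      · exact hx c (by simp [h])
      · exact hy c (by simp [h])
    · simp at hc
      rcases hc with h | h
      · exact hy c (by simp [h])
      · exact hx c (by simp [h])
  · rw [pvSwap_cons_ne x1 _ hx1 (by simp), pvSwap_mid xt y1 yt hxt hy1 hyt]

lemma pvComp {j : ℕ} (x y : List Char) (hjx : j < x.length) (hjy : j < y.length) :
    (x.drop j ++ y.take j).tail ++ (y.drop j ++ x.take j).take 1 =
      x.drop (j + 1) ++ y.take (j + 1) := by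
  have hy : y.take (j + 1) = y.take j ++ [y[j]] := by
    rw [List.take_add_one, List.getElem?_eq_getElem hjy]; simp
  rw [List.drop_eq_getElem_cons hjx, List.drop_eq_getElem_cons hjy, hy]
  simp only [List.cons_append, List.tail_cons, List.take_succ_cons, List.take_zero,
    List.append_assoc]

lemma pvStepP_iter {N : ℕ} : ∀ (j : ℕ) {x y : List Char}, x.length = N → y.length = N →
    j ≤ N → pvStepP^[j] (x, y) = (x.drop j ++ y.take j, y.drop j ++ x.take j) := by
  intro j
  induction j with
  | zero => intro x y _ _ _; simp
  | succ j ih =>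
      intro x y hx hy hj
      rw [Function.iterate_succ_apply', ih hx hy (by omega)]
      have hjx : j < x.length := by omega
      have hjy : j < y.length := by omega
      simp only [pvStepP]
      exact Prod.ext (pvComp x y hjx hjy) (pvComp y x hjy hjx)

lemma pvDisjoint_pair (S : List String) (u v : String) :
    collections_disjoint S [u, v] = false ↔ (u ∈ S ∨ v ∈ S) := by
  rw [collections_disjoint, decide_eq_false_iff_not, PySem.Set.inter,
    List.length_eq_zero_iff, List.filter_eq_nil_iff]
  push_neg
  constructor
  · rintro ⟨x, hx, hcx⟩
    have hxS : x ∈ S := (PySem.Set.mem_ofList S x).1 hx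
    have : x ∈ PySem.Set.ofList [u, v] := (PySem.Set.contains_iff _ _).1 (by simpa using hcx)
    have : x ∈ [u, v] := (PySem.Set.mem_ofList _ _).1 this
    simp at this
    rcases this with rfl | rfl
    · exact Or.inl hxS
    · exact Or.inr hxS
  · rintro (h | h)
    · exact ⟨u, (PySem.Set.mem_ofList S u).2 h, by
        simpa using (PySem.Set.contains_iff (PySem.Set.ofList [u, v]) u).2
          ((PySem.Set.mem_ofList _ _).2 (by simp))⟩
    · exact ⟨v, (PySem.Set.mem_ofList S v).2 h, by
        simpa using (PySem.Set.contains_iff (PySem.Set.ofList [u, v]) v).2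
          ((PySem.Set.mem_ofList _ _).2 (by simp))⟩

lemma pvShiftLoop_iff (S : List String) :
    ∀ (lst : List Int) (x y : List Char), pvNS x → pvNS y → x ≠ [] → y ≠ [] →
      x.length = y.length →
      (pvShiftLoop S lst [String.ofList x, String.ofList y] = true ↔
        ∃ j < lst.length,
          (String.ofList (pvStepP^[j + 1] (x, y)).1 ∈ S ∨
           String.ofList (pvStepP^[j + 1] (x, y)).2 ∈ S)) := by
  intro lst
  induction lst with
  | nil => intro x y _ _ _ _ _; simp [pvShiftLoop]
  | cons i rest ih =>
      intro x y hx hy hx0 hy0 hlen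
      rw [pvShiftLoop]
      simp only [pvTransform_pair hx hy hx0 hy0]
      set X1 := (pvStepP (x, y)).1 with hX1
      set Y1 := (pvStepP (x, y)).2 with hY1
      have hXns : pvNS X1 := by
        intro c hc
        rw [hX1] at hc; simp only [pvStepP] at hc
        rcases List.mem_append.1 hc with h | h
        · exact hx c (List.mem_of_mem_tail h)
        · exact hy c (List.mem_of_mem_take h)
      have hYns : pvNS Y1 := by
        intro c hc
        rw [hY1] at hc; simp only [pvStepP] at hc
        rcases List.mem_append.1 hc with h | h
        · exact hy c (List.mem_of_mem_tail h)
        · exact hx c (List.mem_of_mem_take h)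
      have hX0 : X1 ≠ [] := by
        rw [hX1]; simp only [pvStepP]
        simp [hy0]
      have hY0 : Y1 ≠ [] := by
        rw [hY1]; simp only [pvStepP]
        simp [hx0]
      have hL : X1.length = Y1.length := by
        rw [hX1, hY1]; simp only [pvStepP]
        have h1 : x.length ≠ 0 := by simpa using hx0
        have h2 : y.length ≠ 0 := by simpa using hy0
        simp [List.length_tail, List.length_take]
        omega
      have hpair : (X1, Y1) = pvStepP (x, y) := rfl
      have hiter : ∀ j : ℕ, pvStepP^[j + 1] (X1, Y1) = pvStepP^[j + 2] (x, y) := by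
        intro j
        rw [hpair, ← Function.iterate_succ_apply pvStepP (j + 1) (x, y)]
      by_cases hd : collections_disjoint S [String.ofList X1, String.ofList Y1] = false
      · rw [if_pos hd]
        simp only [true_iff]
        exact ⟨0, by simp, by simpa [hpair] using (pvDisjoint_pair S _ _).1 hd⟩
      · rw [if_neg hd, ih X1 Y1 hXns hYns hX0 hY0 hL]
        have hnohit : ¬(String.ofList (pvStepP^[0 + 1] (x, y)).1 ∈ S ∨
            String.ofList (pvStepP^[0 + 1] (x, y)).2 ∈ S) := by
          intro hh
          exact hd ((pvDisjoint_pair S _ _).2 (by simpa [hpair] using hh))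
        constructor
        · rintro ⟨j, hj, hh⟩
          exact ⟨j + 1, by simpa using Nat.succ_lt_succ hj, by
            rw [show j + 1 + 1 = j + 2 from rfl, ← hiter j]; exact hh⟩
        · rintro ⟨j, hj, hh⟩
          cases j with
          | zero => exact absurd hh hnohit
          | succ j' =>
              refine ⟨j', by simpa using Nat.lt_of_succ_lt_succ (by simpa using hj), ?_⟩
              rw [hiter j']
              exact hh

lemma pvRange_one_length (a b : Int) : (PySem.List.pyRange a b 1).length = (b - a).toNat := by
  rw [PySem.List.pyRange]
  split_ifs with h0 h1 h2 <;> simp_all <;> omega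

lemma pvSet_ofList_sublist {α : Type} [BEq α] (xs : List α) :
    (PySem.Set.ofList xs).Sublist xs := by
  induction xs using List.reverseRecOn with
  | nil => simp [PySem.Set.ofList, PySem.Set.empty]
  | append_singleton xs x ih =>
      rw [PySem.Set.ofList_append_singleton, PySem.Set.add]
      split_ifs
      · exact ih.trans (List.sublist_append_left xs [x])
      · exact List.Sublist.append ih (List.Sublist.refl [x])

lemma pvWindow_eq (a b : String) (k : Int) (hk : 0 ≤ k) :
    pvWindow a b k = String.ofList (a.toList.drop k.toNat ++ b.toList.take k.toNat) := by
  rw [pvWindow, PySem.List.slice_from _ hk, PySem.List.slice_to _ hk]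

lemma pvMain_iff (S : List String) (lv : Int) (N : ℕ)
    (hns : ∀ s ∈ S, pvNS s.toList)
    (hlist : ∀ s ∈ S, s.toList.length = N)
    (hN1 : 1 ≤ N) (hlvN : lv ≤ (N : Int)) :
    ((S.any fun a => S.any fun b =>
        if a ≠ b then pvShiftLoop S (PySem.List.pyRange 1 lv) [a, b] else false) = true ↔
      (S.all fun a => S.all fun b =>
        if a ≠ b then (PySem.List.pyRange 1 lv).all
            (fun k => !(PySem.Set.contains S (pvWindow a b k)))
        else true) = false) := by
  have hwin : ∀ a ∈ S, ∀ b ∈ S, ∀ j : ℕ, j + 1 ≤ N →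
      (pvStepP^[j + 1] (a.toList, b.toList)) =
        (a.toList.drop (j+1) ++ b.toList.take (j+1), b.toList.drop (j+1) ++ a.toList.take (j+1)) :=
    fun a ha b hb j hj => pvStepP_iter (j + 1) (hlist a ha) (hlist b hb) hj
  have hloop : ∀ a ∈ S, ∀ b ∈ S,
      (pvShiftLoop S (PySem.List.pyRange 1 lv 1) [a, b] = true ↔
        ∃ j : ℕ, j < (lv - 1).toNat ∧
          (String.ofList (a.toList.drop (j+1) ++ b.toList.take (j+1)) ∈ S ∨
           String.ofList (b.toList.drop (j+1) ++ a.toList.take (j+1)) ∈ S)) := by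
    intro a ha b hb
    rw [show ([a, b] : List String) = [String.ofList a.toList, String.ofList b.toList] from by
      simp [String.ofList_toList]]
    rw [pvShiftLoop_iff S _ _ _ (hns a ha) (hns b hb)
      (List.ne_nil_of_length_pos (by have := hlist a ha; omega))
      (List.ne_nil_of_length_pos (by have := hlist b hb; omega))
      (by rw [hlist a ha, hlist b hb])]
    rw [pvRange_one_length]
    constructor
    · rintro ⟨j, hj, hit⟩
      refine ⟨j, hj, ?_⟩
      rwa [hwin a ha b hb j (by omega)] at hit
    · rintro ⟨j, hj, hit⟩
      refine ⟨j, hj, ?_⟩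
      rwa [hwin a ha b hb j (by omega)]
  constructor
  · -- A finds a collision → B's all is false
    rw [List.any_eq_true]
    rintro ⟨a, ha, hin⟩
    rw [List.any_eq_true] at hin
    obtain ⟨b, hb, hif⟩ := hin
    by_cases hab : a = b
    · rw [if_neg (by simp [hab])] at hif
      exact absurd hif (by simp)
    · rw [if_pos hab, hloop a ha b hb] at hif
      obtain ⟨j, hj, hit⟩ := hif
      rw [List.all_eq_false]
      have hk0 : (0 : Int) ≤ (j : Int) + 1 := by omega
      have hkmem : ((j : Int) + 1) ∈ PySem.List.pyRange 1 lv 1 :=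
        PySem.List.mem_pyRange_one.2 (by omega)
      have htn : ((j : Int) + 1).toNat = j + 1 := by omega
      cases hit with
      | inl h =>
          refine ⟨a, ha, ?_⟩
          rw [Bool.not_eq_true, List.all_eq_false]
          refine ⟨b, hb, ?_⟩
          rw [if_pos hab, Bool.not_eq_true, List.all_eq_false]
          refine ⟨(j : Int) + 1, hkmem, ?_⟩
          rw [Bool.not_eq_true, Bool.not_eq_false']
          rw [pvWindow_eq a b _ hk0, htn]
          exact (PySem.Set.contains_iff S _).2 h
      | inr h =>
          refine ⟨b, hb, ?_⟩
          rw [Bool.not_eq_true, List.all_eq_false]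
          refine ⟨a, ha, ?_⟩
          rw [if_pos (fun h' => hab h'.symm), Bool.not_eq_true, List.all_eq_false]
          refine ⟨(j : Int) + 1, hkmem, ?_⟩
          rw [Bool.not_eq_true, Bool.not_eq_false']
          rw [pvWindow_eq b a _ hk0, htn]
          exact (PySem.Set.contains_iff S _).2 h
  · -- B finds a collision → A's any is true
    rw [List.all_eq_false]
    rintro ⟨a, ha, hin⟩
    rw [Bool.not_eq_true, List.all_eq_false] at hin
    obtain ⟨b, hb, hif⟩ := hin
    rw [Bool.not_eq_true] at hif
    by_cases hab : a = b
    · rw [if_neg (by simp [hab])] at hif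
      exact absurd hif (by simp)
    · rw [if_pos hab] at hif
      rw [List.all_eq_false] at hif
      obtain ⟨k, hk, hc⟩ := hif
      have hkb := PySem.List.mem_pyRange_one.1 hk
      have hc' : PySem.Set.contains S (pvWindow a b k) = true := by simpa using hc
      have hmem : pvWindow a b k ∈ S := (PySem.Set.contains_iff S _).1 hc'
      rw [List.any_eq_true]
      refine ⟨a, ha, ?_⟩
      rw [List.any_eq_true]
      refine ⟨b, hb, ?_⟩
      rw [if_pos hab, hloop a ha b hb]
      refine ⟨k.toNat - 1, by omega, Or.inl ?_⟩
      have h1 : k.toNat - 1 + 1 = k.toNat := by omega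
      rw [h1, ← pvWindow_eq a b k (by omega)]
      exact hmem

-- ===== VERDICT (by name: the statement is the Claim_ definition above) =====
theorem is_comma_free_spec : Claim_equal_is_comma_free := by
  intro strings length _ hPre
  unfold Spec_is_comma_free
  cases strings with
  | nil => rfl
  | cons s0 rest =>
    simp only [is_comma_free, is_comma_free_alt]
    set S := s0 :: rest with hS
    set lv := (match length with | none => PySem.Str.len s0 | some v => v) with hlv
    by_cases h1 : (PySem.Set.ofList (S.map (fun s => PySem.Str.len s))).length ≠ 1
    · simp only [if_pos h1]
    · simp only [if_neg h1]
      by_cases h2 : (PySem.Set.ofList S).length = S.length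
      · have hdupf : has_duplicates S = false := by
          rw [has_duplicates]; exact decide_eq_false (fun h => h h2.symm)
        rw [pvIfFalse _ hdupf, if_neg (show ¬((PySem.Set.ofList S).length ≠ S.length) from fun h => h h2)]
        have hofl : PySem.Set.ofList S = S := (pvSet_ofList_sublist S).eq_of_length h2
        have hnd : S.Nodup := hofl ▸ PySem.Set.nodup_ofList S
        rw [hofl]
        by_cases h3 : S.length < 2
        · rw [if_pos h3]
          have hrest : rest = [] := by
            have : S.length = rest.length + 1 := by rw [hS]; simp
            have : rest.length = 0 := by omega
            simpa using this
          have hany : (S.any fun a => S.any fun b =>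
              if a ≠ b then pvShiftLoop S (PySem.List.pyRange 1 lv) [a, b] else false) = false := by
            rw [hS, hrest]
            simp
          rw [pvIfFalse _ hany]
        · rw [if_neg h3]
          -- at least two distinct strings, all of the same length N ≥ 1
          obtain ⟨s1, rest2, hrest⟩ : ∃ s1 rest2, rest = s1 :: rest2 := by
            cases rest with
            | nil => exfalso; apply h3; rw [hS]; simp
            | cons s1 rest2 => exact ⟨s1, rest2, rfl⟩
          have hs0S : s0 ∈ S := by rw [hS]; simp
          have hs1S : s1 ∈ S := by rw [hS, hrest]; simp
          have hne01 : s0 ≠ s1 := by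
            rw [hS, hrest] at hnd
            intro h
            exact (List.nodup_cons.1 hnd).1 (by simp [h])
          have hlenall : ∀ s ∈ S, PySem.Str.len s = PySem.Str.len s0 := by
            rw [not_not] at h1
            obtain ⟨x, hx⟩ := List.length_eq_one_iff.1 h1
            have hmem : ∀ v ∈ S.map (fun s => PySem.Str.len s), v = x := by
              intro v hv
              have := (PySem.Set.mem_ofList _ v).2 hv
              rw [hx] at this
              simpa using this
            intro s hs
            rw [hmem _ (List.mem_map_of_mem hs), hmem _ (List.mem_map_of_mem hs0S)]
          have hlist : ∀ s ∈ S, s.toList.length = s0.toList.length := by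
            intro s hs
            have := hlenall s hs
            simp only [PySem.Str.len] at this
            exact_mod_cast this
          set N := s0.toList.length with hN
          have hN1 : 1 ≤ N := by
            by_contra hc
            have h0 : s0.toList = [] := by
              have : s0.toList.length = 0 := by omega
              simpa using this
            have h1' : s1.toList = [] := by
              have := hlist s1 hs1S
              have : s1.toList.length = 0 := by omega
              simpa using this
            exact hne01 (by rw [← String.ofList_toList (s := s0), ← String.ofList_toList (s := s1), h0, h1'])
          have hlen0 : PySem.Str.len s0 = (N : Int) := by simp [PySem.Str.len, hN]
          -- inside this branch Pre_ leaves two possibilities: whitespace-free codons,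
          -- or a shift range that is empty so the loop body never runs
          have hws_or : lv ≤ 1
              ∨ (S.all fun s => s.toList.all fun c => !PySem.Chars.isspace c) = true := by
            rcases hPre with h | h | h | h | h
            · exact Or.inr h
            · exact absurd h (by omega)
            · exact absurd hnd h
            · exfalso
              rw [List.any_eq_true] at h
              obtain ⟨s, hs, hin⟩ := h
              rw [List.any_eq_true] at hin
              obtain ⟨t, ht, hin2⟩ := hin
              exact (decide_eq_true_iff.1 hin2) (by rw [hlist s hs, hlist t ht])
            · refine Or.inl ?_
              rw [hlv]
              cases length with
              | none => simpa [hS] using h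
              | some v => simpa using h
          rcases hws_or with hlv1 | hws
          -- first: lv ≤ 1, the shift range is empty and both sides return true
          · 
            have hrange : PySem.List.pyRange 1 lv 1 = [] :=
              List.eq_nil_of_length_eq_zero (by rw [pvRange_one_length]; omega)
            have hany : (S.any fun a => S.any fun b =>
                if a ≠ b then pvShiftLoop S (PySem.List.pyRange 1 lv) [a, b] else false) = false := by
              rw [List.any_eq_false]
              intro a _
              rw [Bool.not_eq_true, List.any_eq_false]
              intro b _
              by_cases hab : a = b
              · rw [if_neg (by simp [hab])]
                simp
              · rw [if_pos hab, hrange]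
                simp [pvShiftLoop]
            rw [pvIfFalse _ hany, if_neg (show ¬ lv > PySem.Str.len s0 from by rw [hlen0]; omega)]
            have hall : (S.all fun a => S.all fun b =>
                if a ≠ b then (PySem.List.pyRange 1 lv).all
                    (fun k => !(PySem.Set.contains S (pvWindow a b k)))
                else true) = true := by
              rw [List.all_eq_true]
              intro a _
              rw [List.all_eq_true]
              intro b _
              by_cases hab : a = b
              · rw [if_neg (by simp [hab])]
              · rw [if_pos hab, hrange]
                simp
            rw [hall]
          -- now the whitespace-free case, where the shift loop is characterised exactly
          have hns : ∀ s ∈ S, pvNS s.toList :=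
            fun s hs c hc => pvPre_forall S hws s hs c hc
          by_cases h4 : lv > PySem.Str.len s0
          · rw [if_pos h4]
            have hany : (S.any fun a => S.any fun b =>
                if a ≠ b then pvShiftLoop S (PySem.List.pyRange 1 lv) [a, b] else false) = true := by
              rw [List.any_eq_true]
              refine ⟨s0, hs0S, ?_⟩
              rw [List.any_eq_true]
              refine ⟨s1, hs1S, ?_⟩
              rw [if_pos hne01]
              rw [show ([s0, s1] : List String) =
                [String.ofList s0.toList, String.ofList s1.toList] from by
                  simp [String.ofList_toList]]
              rw [pvShiftLoop_iff S _ _ _ (hns s0 hs0S) (hns s1 hs1S)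
                (List.ne_nil_of_length_pos (by omega))
                (List.ne_nil_of_length_pos (by have := hlist s1 hs1S; omega))
                (by rw [hlist s1 hs1S])]
              refine ⟨N - 1, ?_, ?_⟩
              · rw [pvRange_one_length]
                rw [hlen0] at h4
                omega
              · rw [show N - 1 + 1 = N from by omega,
                  pvStepP_iter N rfl (hlist s1 hs1S) (le_refl N)]
                left
                rw [List.drop_of_length_le (by omega), List.take_of_length_le (by rw [hlist s1 hs1S]),
                  List.nil_append, String.ofList_toList]
                exact hs1S
            rw [pvIfTrue _ hany]
          · rw [if_neg h4]
            have hlvN : lv ≤ (N : Int) := by rw [hlen0] at h4; omega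
            -- both sides detect exactly the same collision witnesses
            have hiff : (S.any fun a => S.any fun b =>
                if a ≠ b then pvShiftLoop S (PySem.List.pyRange 1 lv) [a, b] else false) = true ↔
                (S.all fun a => S.all fun b =>
                  if a ≠ b then (PySem.List.pyRange 1 lv).all
                      (fun k => !(PySem.Set.contains S (pvWindow a b k)))
                  else true) = false :=
              pvMain_iff S lv N hns hlist hN1 hlvN
            cases hall : (S.all fun a => S.all fun b =>
                if a ≠ b then (PySem.List.pyRange 1 lv).all
                    (fun k => !(PySem.Set.contains S (pvWindow a b k)))
                else true) with
            | false => rw [if_pos (hiff.2 hall)]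
            | true =>
                have hany : (S.any fun a => S.any fun b =>
                    if a ≠ b then pvShiftLoop S (PySem.List.pyRange 1 lv) [a, b] else false) = false := by
                  cases hA : (S.any fun a => S.any fun b =>
                      if a ≠ b then pvShiftLoop S (PySem.List.pyRange 1 lv) [a, b] else false) with
                  | false => rfl
                  | true => rw [hiff.1 hA] at hall; exact absurd hall (by simp)
                rw [pvIfFalse _ hany]
      · have hdupt : has_duplicates S = true := by
          rw [has_duplicates]; exact decide_eq_true (fun h => h2 h.symm)
        rw [pvIfTrue _ hdupt, if_pos (show (PySem.Set.ofList S).length ≠ S.length from fun h => h2 h)]
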